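-- pv_equiv track=rewrite | github.com/sskys18/codetree-TILs | 241006/트로미노/tromino.py | max_block_sum
-- ===== SOURCE A (Python) =====
-- blocks = [
--     [(0, 0), (1, 0), (1, 1)],  # ㄱ자 모양
--     [(0, 0), (0, 1), (0, 2)],  # ㅡ자 모양
-- ]
--
-- def max_block_sum(n, m, grid):
--     max_sum = 0
--
--     # 회전 및 뒤집기 적용한 모든 블럭 정의
--     all_blocks = []
--
--     # 각 블럭을 회전하거나 뒤집은 경우의 모양을 모두 저장
--     for block in blocks:
--         for _ in range(4):  # 4방향 회전
--             rotated_block = [(y, -x) for x, y in block]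
--             all_blocks.append(rotated_block)
--             block = rotated_block  # 다음 회전 위한 준비
--
--         # 뒤집기
--         flipped_block = [(-x, y) for x, y in block]
--         all_blocks.append(flipped_block)
--
--     # 블럭을 모든 위치에 놓아본다
--     for i in range(n):
--         for j in range(m):
--             for block in all_blocks:
--                 block_sum = 0
--                 valid = True
--                 for dx, dy in block:
--                     x, y = i + dx, j + dy
--                     if 0 <= x < n and 0 <= y < m:
--                         block_sum += grid[x][y]
--                     else:
--                         valid = False
--                         break
--                 if valid:
--                     max_sum = max(max_sum, block_sum)
--
--     return max_sum
-- ===== SOURCE B (Python) =====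
-- def max_block_sum(n, m, grid):
--     best = 0
--     # every L-tromino lies in a 2x2 window; the best one there is the window sum minus its min
--     for i in range(n - 1):
--         for j in range(m - 1):
--             a = grid[i][j]; b = grid[i][j + 1]; c = grid[i + 1][j]; d = grid[i + 1][j + 1]
--             best = max(best, a + b + c + d - min(a, b, c, d))
--     # horizontal I-trominoes
--     for i in range(n):
--         for j in range(m - 2):
--             best = max(best, grid[i][j] + grid[i][j + 1] + grid[i][j + 2])
--     # vertical I-trominoes
--     for i in range(n - 2):
--         for j in range(m):
--             best = max(best, grid[i][j] + grid[i + 1][j] + grid[i + 2][j])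
--     return best
-- ===== Notes on version B (the rewrite author's own statement) =====
-- stated objective: simpler
-- what changed: B drops A's generation and per-cell enumeration of 10 rotated/flipped tromino shapes with bounds checks, instead scanning each 2x2 window once (best L-tromino there = window sum minus window min) plus two plain triple-sum loops for the I-trominoes.
import Mathlib
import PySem

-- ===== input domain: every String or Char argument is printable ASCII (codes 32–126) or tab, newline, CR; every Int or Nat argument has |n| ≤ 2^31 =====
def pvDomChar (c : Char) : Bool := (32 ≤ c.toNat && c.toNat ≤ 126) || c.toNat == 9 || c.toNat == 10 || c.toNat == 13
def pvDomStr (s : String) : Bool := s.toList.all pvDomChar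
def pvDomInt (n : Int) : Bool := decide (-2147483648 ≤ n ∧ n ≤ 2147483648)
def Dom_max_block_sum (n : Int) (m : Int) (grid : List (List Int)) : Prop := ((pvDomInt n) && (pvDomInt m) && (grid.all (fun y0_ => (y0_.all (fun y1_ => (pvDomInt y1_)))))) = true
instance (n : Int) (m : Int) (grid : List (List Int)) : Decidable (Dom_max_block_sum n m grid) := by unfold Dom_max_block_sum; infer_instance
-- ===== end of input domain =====

-- B replaces A's enumeration of 10 rotated/flipped tromino shapes by a direct scan:
-- best L in each 2x2 window is (window sum - window min), plus two triple-sum loops (objective: simpler).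

-- ===== PORT A =====
-- grid[x][y] (both Pythons): 0 outside the grid, which inside Pre_ is never reached
def pvCell (grid : List (List Int)) (x y : Int) : Int :=
  match PySem.List.pyGet? grid x with
  | none => 0
  | some row => (PySem.List.pyGet? row y).getD 0

def pvBlocks : List (List (Int × Int)) :=
  [[(0, 0), (1, 0), (1, 1)], [(0, 0), (0, 1), (0, 2)]]

-- the two generation loops: 4 rotations appended, then the flip of the final rotation
def pvAllBlocks : List (List (Int × Int)) :=
  pvBlocks.foldl (fun acc block =>
    let st := (PySem.List.pyRange 0 4 1).foldl
      (fun (st : List (List (Int × Int)) × List (Int × Int)) _ =>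
        let rb := st.2.map (fun p => (p.2, -p.1))
        (st.1 ++ [rb], rb)) (acc, block)
    st.1 ++ [st.2.map (fun p => (-p.1, p.2))]) []

-- the inner 'for dx, dy in block' loop with its valid/break flag: none = break (invalid)
def pvTryBlock (n m : Int) (grid : List (List Int)) (i j : Int) :
    List (Int × Int) → Int → Option Int
  | [], s => some s
  | (dx, dy) :: rest, s =>
    let x := i + dx
    let y := j + dy
    if 0 ≤ x ∧ x < n ∧ 0 ≤ y ∧ y < m then
      pvTryBlock n m grid i j rest (s + pvCell grid x y)
    else
      none

def max_block_sum (n : Int) (m : Int) (grid : List (List Int)) : Int :=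
  (PySem.List.pyRange 0 n 1).foldl (fun ms i =>
    (PySem.List.pyRange 0 m 1).foldl (fun ms j =>
      pvAllBlocks.foldl (fun ms block =>
        match pvTryBlock n m grid i j block 0 with
        | some s => max ms s
        | none => ms) ms) ms) 0

-- ===== PORT B =====
def max_block_sum_alt (n : Int) (m : Int) (grid : List (List Int)) : Int :=
  let best1 := (PySem.List.pyRange 0 (n - 1) 1).foldl (fun best i =>
    (PySem.List.pyRange 0 (m - 1) 1).foldl (fun best j =>
      let a := pvCell grid i j
      let b := pvCell grid i (j + 1)
      let c := pvCell grid (i + 1) j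
      let d := pvCell grid (i + 1) (j + 1)
      max best (a + b + c + d - min a (min b (min c d)))) best) 0
  let best2 := (PySem.List.pyRange 0 n 1).foldl (fun best i =>
    (PySem.List.pyRange 0 (m - 2) 1).foldl (fun best j =>
      max best (pvCell grid i j + pvCell grid i (j + 1) + pvCell grid i (j + 2))) best) best1
  (PySem.List.pyRange 0 (n - 2) 1).foldl (fun best i =>
    (PySem.List.pyRange 0 m 1).foldl (fun best j =>
      max best (pvCell grid i j + pvCell grid (i + 1) j + pvCell grid (i + 2) j)) best) best2

-- ===== PRECONDITION & SPEC =====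
-- Pre_ excludes exactly the inputs on which A raises IndexError: when both n > 0 and m > 0,
-- the grid must have at least n rows whose first n rows each have at least m entries.
def Pre_max_block_sum (n : Int) (m : Int) (grid : List (List Int)) : Prop :=
  n ≤ 0 ∨ m ≤ 0 ∨ (n ≤ grid.length ∧ ∀ r ∈ grid.take n.toNat, m ≤ r.length)
instance (n : Int) (m : Int) (grid : List (List Int)) : Decidable (Pre_max_block_sum n m grid) := by
  unfold Pre_max_block_sum; infer_instance

def pvWitness_max_block_sum : Int × Int × List (List Int) := (2, 3, [[1, -2, 3], [4, 5, -6]])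

def Spec_max_block_sum (n : Int) (m : Int) (grid : List (List Int)) (out : Int) : Prop := out = max_block_sum_alt n m grid
instance (n : Int) (m : Int) (grid : List (List Int)) (out : Int) : Decidable (Spec_max_block_sum n m grid out) := by unfold Spec_max_block_sum; infer_instance

-- ===== CLAIM (what is proved, stated in full; the proofs are below) =====
def Claim_equal_max_block_sum : Prop := ∀ (n : Int) (m : Int) (grid : List (List Int)), Dom_max_block_sum n m grid → Pre_max_block_sum n m grid → Spec_max_block_sum n m grid (max_block_sum n m grid)

-- ===== LEMMAS AND PROOFS =====

-- the generated block list, computed once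
theorem pvAllBlocks_eq : pvAllBlocks =
    [[(0, 0), (0, -1), (1, -1)], [(0, 0), (-1, 0), (-1, -1)], [(0, 0), (0, 1), (-1, 1)],
     [(0, 0), (1, 0), (1, 1)], [(0, 0), (-1, 0), (-1, 1)],
     [(0, 0), (1, 0), (2, 0)], [(0, 0), (0, -1), (0, -2)], [(0, 0), (-1, 0), (-2, 0)],
     [(0, 0), (0, 1), (0, 2)], [(0, 0), (0, 1), (0, 2)]] := by decide

-- generic running-max lemmas
theorem pvFoldlMaxMap {α : Type} (f : α → Int) (l : List α) (a : Int) :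
    l.foldl (fun acc x => max acc (f x)) a = (l.map f).foldl max a := by
  induction l generalizing a with
  | nil => rfl
  | cons x t ih => simp [List.foldl, ih]

theorem pvFoldlMaxFilterMap {α : Type} (f : α → Option Int) (l : List α) (a : Int) :
    l.foldl (fun ms x => match f x with | some s => max ms s | none => ms) a
      = (l.filterMap f).foldl max a := by
  induction l generalizing a with
  | nil => rfl
  | cons x t ih =>
    cases hf : f x <;> simp [List.foldl, hf, ih]

theorem pvFoldlMaxFlat {α : Type} (g : α → List Int) (l : List α) (a : Int) :
    l.foldl (fun acc x => (g x).foldl max acc) a = (l.flatMap g).foldl max a := by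
  induction l generalizing a with
  | nil => rfl
  | cons x t ih => simp [List.foldl, List.flatMap_cons, List.foldl_append, ih]

theorem pvFoldlMaxEq (l1 l2 : List Int) (a : Int)
    (h1 : ∀ x ∈ l1, x ≤ l2.foldl max a) (h2 : ∀ x ∈ l2, x ≤ l1.foldl max a) :
    l1.foldl max a = l2.foldl max a := by
  apply le_antisymm
  · rcases PySem.List.foldl_max_mem l1 a with h | h
    · rw [h]; exact (PySem.List.le_foldl_max l2 a).1
    · exact h1 _ h
  · rcases PySem.List.foldl_max_mem l2 a with h | h
    · rw [h]; exact (PySem.List.le_foldl_max l1 a).1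
    · exact h2 _ h

-- candidate lists
def pvCandA (n m : Int) (grid : List (List Int)) : List Int :=
  (PySem.List.pyRange 0 n 1).flatMap (fun i =>
    (PySem.List.pyRange 0 m 1).flatMap (fun j =>
      pvAllBlocks.filterMap (fun b => pvTryBlock n m grid i j b 0)))

def pvW (grid : List (List Int)) (i j : Int) : Int :=
  pvCell grid i j + pvCell grid i (j + 1) + pvCell grid (i + 1) j + pvCell grid (i + 1) (j + 1)
    - min (pvCell grid i j) (min (pvCell grid i (j + 1)) (min (pvCell grid (i + 1) j) (pvCell grid (i + 1) (j + 1))))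

def pvCandB (n m : Int) (grid : List (List Int)) : List Int :=
  (((PySem.List.pyRange 0 (n - 1) 1).flatMap (fun i =>
      (PySem.List.pyRange 0 (m - 1) 1).map (fun j => pvW grid i j)) ++
    (PySem.List.pyRange 0 n 1).flatMap (fun i =>
      (PySem.List.pyRange 0 (m - 2) 1).map (fun j =>
        pvCell grid i j + pvCell grid i (j + 1) + pvCell grid i (j + 2)))) ++
    (PySem.List.pyRange 0 (n - 2) 1).flatMap (fun i =>
      (PySem.List.pyRange 0 m 1).map (fun j =>
        pvCell grid i j + pvCell grid (i + 1) j + pvCell grid (i + 2) j)))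

theorem pvCharA (n m : Int) (grid : List (List Int)) :
    max_block_sum n m grid = (pvCandA n m grid).foldl max 0 := by
  unfold max_block_sum pvCandA
  simp only [pvFoldlMaxFilterMap, pvFoldlMaxFlat]

theorem pvCharB (n m : Int) (grid : List (List Int)) :
    max_block_sum_alt n m grid = (pvCandB n m grid).foldl max 0 := by
  unfold max_block_sum_alt pvCandB
  simp only [pvFoldlMaxMap, pvFoldlMaxFlat, List.foldl_append, pvW]


theorem pvLeFold (c x : Int) (l : List Int) (hc : c ∈ l) (hx : x ≤ c) : x ≤ l.foldl max 0 :=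
  le_trans hx ((PySem.List.le_foldl_max l 0).2 c hc)

theorem pvTry3 (n m : Int) (grid : List (List Int)) (i j dx1 dy1 dx2 dy2 dx3 dy3 : Int) :
    pvTryBlock n m grid i j [(dx1, dy1), (dx2, dy2), (dx3, dy3)] 0 =
      if 0 ≤ i + dx1 ∧ i + dx1 < n ∧ 0 ≤ j + dy1 ∧ j + dy1 < m ∧
         0 ≤ i + dx2 ∧ i + dx2 < n ∧ 0 ≤ j + dy2 ∧ j + dy2 < m ∧
         0 ≤ i + dx3 ∧ i + dx3 < n ∧ 0 ≤ j + dy3 ∧ j + dy3 < m then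
        some (0 + pvCell grid (i + dx1) (j + dy1) + pvCell grid (i + dx2) (j + dy2)
          + pvCell grid (i + dx3) (j + dy3))
      else none := by
  simp only [pvTryBlock]
  split_ifs <;> tauto

theorem pvMemB1 (n m : Int) (grid : List (List Int)) (p q : Int)
    (h : 0 ≤ p ∧ p < n - 1 ∧ 0 ≤ q ∧ q < m - 1) : pvW grid p q ∈ pvCandB n m grid := by
  simp only [pvCandB, List.mem_append, List.mem_flatMap, List.mem_map, PySem.List.mem_pyRange_one]
  exact Or.inl (Or.inl ⟨p, ⟨h.1, h.2.1⟩, q, ⟨h.2.2.1, h.2.2.2⟩, rfl⟩)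

theorem pvMemB2 (n m : Int) (grid : List (List Int)) (p q : Int)
    (h : 0 ≤ p ∧ p < n ∧ 0 ≤ q ∧ q < m - 2) :
    pvCell grid p q + pvCell grid p (q + 1) + pvCell grid p (q + 2) ∈ pvCandB n m grid := by
  simp only [pvCandB, List.mem_append, List.mem_flatMap, List.mem_map, PySem.List.mem_pyRange_one]
  exact Or.inl (Or.inr ⟨p, ⟨h.1, h.2.1⟩, q, ⟨h.2.2.1, h.2.2.2⟩, rfl⟩)

theorem pvMemB3 (n m : Int) (grid : List (List Int)) (p q : Int)
    (h : 0 ≤ p ∧ p < n - 2 ∧ 0 ≤ q ∧ q < m) :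
    pvCell grid p q + pvCell grid (p + 1) q + pvCell grid (p + 2) q ∈ pvCandB n m grid := by
  simp only [pvCandB, List.mem_append, List.mem_flatMap, List.mem_map, PySem.List.mem_pyRange_one]
  exact Or.inr ⟨p, ⟨h.1, h.2.1⟩, q, ⟨h.2.2.1, h.2.2.2⟩, rfl⟩

theorem pvMemA (n m : Int) (grid : List (List Int)) (i j : Int) (b : List (Int × Int)) (x : Int)
    (hi : 0 ≤ i ∧ i < n) (hj : 0 ≤ j ∧ j < m) (hb : b ∈ pvAllBlocks)
    (h : pvTryBlock n m grid i j b 0 = some x) : x ∈ pvCandA n m grid := by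
  simp only [pvCandA, List.mem_flatMap, List.mem_filterMap, PySem.List.mem_pyRange_one]
  exact ⟨i, hi, j, hj, b, hb, h⟩

theorem pvBoundA (n m : Int) (grid : List (List Int)) :
    ∀ x ∈ pvCandA n m grid, x ≤ (pvCandB n m grid).foldl max 0 := by
  intro x hx
  simp only [pvCandA, List.mem_flatMap, List.mem_filterMap, pvAllBlocks_eq,
    PySem.List.mem_pyRange_one, List.mem_cons, List.not_mem_nil, or_false] at hx
  obtain ⟨i, ⟨hi0, hin⟩, j, ⟨hj0, hjm⟩, b, hb, htry⟩ := hx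
  rcases hb with rfl | rfl | rfl | rfl | rfl | rfl | rfl | rfl | rfl | rfl <;>
    (rw [pvTry3] at htry; split_ifs at htry with hB; obtain rfl := Option.some.inj htry)
  · -- (0,0),(0,-1),(1,-1): window (i, j-1)
    refine pvLeFold _ _ _ (pvMemB1 n m grid i (j - 1) (by omega)) ?_
    simp only [pvW]; ring_nf; omega
  · -- (0,0),(-1,0),(-1,-1): window (i-1, j-1)
    refine pvLeFold _ _ _ (pvMemB1 n m grid (i - 1) (j - 1) (by omega)) ?_
    simp only [pvW]; ring_nf; omega
  · -- (0,0),(0,1),(-1,1): window (i-1, j)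
    refine pvLeFold _ _ _ (pvMemB1 n m grid (i - 1) j (by omega)) ?_
    simp only [pvW]; ring_nf; omega
  · -- (0,0),(1,0),(1,1): window (i, j)
    refine pvLeFold _ _ _ (pvMemB1 n m grid i j (by omega)) ?_
    simp only [pvW]; ring_nf; omega
  · -- (0,0),(-1,0),(-1,1): window (i-1, j)
    refine pvLeFold _ _ _ (pvMemB1 n m grid (i - 1) j (by omega)) ?_
    simp only [pvW]; ring_nf; omega
  · -- vertical down
    refine pvLeFold _ _ _ (pvMemB3 n m grid i j (by omega)) ?_
    ring_nf; omega
  · -- horizontal left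
    refine pvLeFold _ _ _ (pvMemB2 n m grid i (j - 2) (by omega)) ?_
    ring_nf; omega
  · -- vertical up
    refine pvLeFold _ _ _ (pvMemB3 n m grid (i - 2) j (by omega)) ?_
    ring_nf; omega
  · -- horizontal right
    refine pvLeFold _ _ _ (pvMemB2 n m grid i j (by omega)) ?_
    ring_nf; omega
  · -- horizontal right (duplicate block)
    refine pvLeFold _ _ _ (pvMemB2 n m grid i j (by omega)) ?_
    ring_nf; omega

theorem pvBoundB (n m : Int) (grid : List (List Int)) :
    ∀ x ∈ pvCandB n m grid, x ≤ (pvCandA n m grid).foldl max 0 := by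
  intro x hx
  simp only [pvCandB, List.mem_append, List.mem_flatMap, List.mem_map,
    PySem.List.mem_pyRange_one] at hx
  rcases hx with (⟨p, hp, q, hq, rfl⟩ | ⟨p, hp, q, hq, rfl⟩) | ⟨p, hp, q, hq, rfl⟩
  · -- 2x2 window: its value is the L-tromino obtained by dropping the minimal corner
    rcases (show min (pvCell grid p q) (min (pvCell grid p (q + 1))
        (min (pvCell grid (p + 1) q) (pvCell grid (p + 1) (q + 1)))) = pvCell grid p q ∨
        min (pvCell grid p q) (min (pvCell grid p (q + 1))
        (min (pvCell grid (p + 1) q) (pvCell grid (p + 1) (q + 1)))) = pvCell grid p (q + 1) ∨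
        min (pvCell grid p q) (min (pvCell grid p (q + 1))
        (min (pvCell grid (p + 1) q) (pvCell grid (p + 1) (q + 1)))) = pvCell grid (p + 1) q ∨
        min (pvCell grid p q) (min (pvCell grid p (q + 1))
        (min (pvCell grid (p + 1) q) (pvCell grid (p + 1) (q + 1)))) = pvCell grid (p + 1) (q + 1)
        from by omega) with hm | hm | hm | hm
    · -- min is the top-left corner: L-block [(0,0),(0,1),(-1,1)] anchored at (p+1, q)
      refine pvLeFold _ _ _ (pvMemA n m grid (p + 1) q [(0, 0), (0, 1), (-1, 1)] _
        (by omega) (by omega) (by decide) (by rw [pvTry3, if_pos (by omega)])) ?_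
      simp only [pvW]; ring_nf at hm ⊢; omega
    · -- min is the top-right corner: L-block [(0,0),(1,0),(1,1)] anchored at (p, q)
      refine pvLeFold _ _ _ (pvMemA n m grid p q [(0, 0), (1, 0), (1, 1)] _
        (by omega) (by omega) (by decide) (by rw [pvTry3, if_pos (by omega)])) ?_
      simp only [pvW]; ring_nf at hm ⊢; omega
    · -- min is the bottom-left corner: L-block [(0,0),(-1,0),(-1,-1)] anchored at (p+1, q+1)
      refine pvLeFold _ _ _ (pvMemA n m grid (p + 1) (q + 1) [(0, 0), (-1, 0), (-1, -1)] _
        (by omega) (by omega) (by decide) (by rw [pvTry3, if_pos (by omega)])) ?_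
      simp only [pvW]; ring_nf at hm ⊢; omega
    · -- min is the bottom-right corner: L-block [(0,0),(0,-1),(1,-1)] anchored at (p, q+1)
      refine pvLeFold _ _ _ (pvMemA n m grid p (q + 1) [(0, 0), (0, -1), (1, -1)] _
        (by omega) (by omega) (by decide) (by rw [pvTry3, if_pos (by omega)])) ?_
      simp only [pvW]; ring_nf at hm ⊢; omega
  · -- horizontal I-tromino
    refine pvLeFold _ _ _ (pvMemA n m grid p q [(0, 0), (0, 1), (0, 2)] _
      (by omega) (by omega) (by decide) (by rw [pvTry3, if_pos (by omega)])) ?_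
    ring_nf; omega
  · -- vertical I-tromino
    refine pvLeFold _ _ _ (pvMemA n m grid p q [(0, 0), (1, 0), (2, 0)] _
      (by omega) (by omega) (by decide) (by rw [pvTry3, if_pos (by omega)])) ?_
    ring_nf; omega

-- ===== VERDICT (by name: the statement is the Claim_ definition above) =====
theorem max_block_sum_spec : Claim_equal_max_block_sum := by
  intro n m grid _ _
  unfold Spec_max_block_sum
  rw [pvCharA, pvCharB]
  exact pvFoldlMaxEq _ _ _ (pvBoundA n m grid) (pvBoundB n m grid)
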